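-- pv_equiv track=rewrite | github.com/Jh-jaehyuk/Programmers_lv2 | 23.04.20/조이스틱_recheck.py | solution
-- ===== SOURCE A (Python) =====
-- def solution(name):
--     answer = 0
--
--     min_val = len(name) - 1
--
--     for i, char in enumerate(name):
--         answer += min(ord(char) - ord('A'), ord('Z') - ord(char) + 1)
--
--         next_idx = i + 1
--         while next_idx < len(name) and name[next_idx] == "A":
--             next_idx += 1
--
--         min_val = min([min_val, 2 * i + len(name) - next_idx, i + 2 * (len(name) - next_idx)])
--
--     answer += min_val
--
--     return answer
-- ===== SOURCE B (Python) =====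
-- def solution(name):
--     # One backward pass carrying d = distance from the next letter needing up/down moves to the end.
--     n = len(name)
--     total = sum(min(b - 65, 91 - b) for b in name.encode())
--     best = n - 1
--     d = 0
--     for i in range(n - 1, -1, -1):
--         v = 2 * i + d if i <= d else i + 2 * d
--         if v < best:
--             best = v
--         if name[i] != 'A':
--             d = n - i
--     return total + best
-- ===== Notes on version B (the rewrite author's own statement) =====
-- stated objective: faster
-- what changed: Replaced the forward loop whose inner while re-scans ahead for the next letter requiring up/down moves by a single backward pass that carries that distance in a variable, accumulating the letter-cost sum and the cursor-move minimum in the same pass.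
import Mathlib
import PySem

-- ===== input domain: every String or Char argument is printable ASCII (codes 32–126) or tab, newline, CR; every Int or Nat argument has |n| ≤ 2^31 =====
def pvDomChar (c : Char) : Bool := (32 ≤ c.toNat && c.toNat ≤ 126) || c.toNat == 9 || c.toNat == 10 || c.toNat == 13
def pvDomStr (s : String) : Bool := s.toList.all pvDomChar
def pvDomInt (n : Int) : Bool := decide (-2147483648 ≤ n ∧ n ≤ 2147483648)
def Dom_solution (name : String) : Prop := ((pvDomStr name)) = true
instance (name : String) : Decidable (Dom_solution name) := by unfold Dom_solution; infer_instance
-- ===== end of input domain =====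

-- B replaces A's per-position inner while-scan by a single backward pass carrying the
-- distance from the next letter needing up/down moves to the end; same return value everywhere.

-- ===== PORT A =====
-- the inner `while next_idx < len(name) and name[next_idx] == "A": next_idx += 1`
def pvNextIdx (s : List Char) (j : Nat) : Nat :=
  if h : j < s.length ∧ s.getD j ' ' = 'A' then pvNextIdx s (j + 1) else j
termination_by s.length - j
decreasing_by omega

-- min([a, b, c]) on Python ints is transliterated as min (min a b) c
def solution (name : String) : Int :=
  let s := name.toList
  let n := s.length
  let res := (List.range n).foldl (fun (st : Int × Int) i =>
      let answer := st.1 + min (((s.getD i ' ').toNat : Int) - 65) (90 - ((s.getD i ' ').toNat : Int) + 1)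
      let nx := pvNextIdx s (i + 1)
      let mv := min (min st.2 ((2 * (i : Int) + (n : Int)) - (nx : Int)))
                    ((i : Int) + 2 * ((n : Int) - (nx : Int)))
      (answer, mv)) ((0 : Int), (n : Int) - 1)
  res.1 + res.2

-- ===== PORT B =====
-- Source B's backward for-loop: counter k+1 means "index i = k is processed next"; state (best, d).
def pvGoB (s : List Char) (n : Nat) : Nat → Int × Int → Int
  | 0, st => st.1
  | k + 1, (best, d) =>
      let v := if (k : Int) ≤ d then 2 * (k : Int) + d else (k : Int) + 2 * d
      let best' := if v < best then v else best
      let d' := if s.getD k ' ' ≠ 'A' then (n : Int) - (k : Int) else d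
      pvGoB s n k (best', d')

-- `sum(min(b - 65, 91 - b) for b in name.encode())`: on the ASCII domain the UTF-8
-- bytes are exactly the code points, so b ↦ c.toNat is exact there.
def solution_alt (name : String) : Int :=
  let s := name.toList
  let n := s.length
  let total := s.foldl (fun a c => a + min ((c.toNat : Int) - 65) (91 - (c.toNat : Int))) 0
  total + pvGoB s n n ((n : Int) - 1, 0)

-- ===== PRECONDITION & SPEC =====
def Spec_solution (name : String) (out : Int) : Prop := out = solution_alt name
instance (name : String) (out : Int) : Decidable (Spec_solution name out) := by unfold Spec_solution; infer_instance

-- ===== CLAIM (what is proved, stated in full; the proofs are below) =====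
def Claim_equal_solution : Prop := ∀ (name : String), Dom_solution name → Spec_solution name (solution name)

-- ===== LEMMAS AND PROOFS =====

-- per-index cost and "min candidate" (the values both ports accumulate)
def pvCost (s : List Char) (i : Nat) : Int :=
  min (((s.getD i ' ').toNat : Int) - 65) (91 - ((s.getD i ' ').toNat : Int))

def pvM (s : List Char) (i : Nat) : Int :=
  min ((2 * (i : Int) + (s.length : Int)) - (pvNextIdx s (i + 1) : Int))
      ((i : Int) + 2 * ((s.length : Int) - (pvNextIdx s (i + 1) : Int)))

theorem pvNextIdx_step (s : List Char) (k : Nat) (hk : k < s.length) :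
    pvNextIdx s k = if s.getD k ' ' ≠ 'A' then k else pvNextIdx s (k + 1) := by
  by_cases h : s.getD k ' ' = 'A'
  · rw [pvNextIdx, dif_pos ⟨hk, h⟩, if_neg (not_not_intro h)]
  · rw [pvNextIdx, dif_neg (fun hc => h hc.2), if_pos h]

theorem pvNextIdx_end (s : List Char) : pvNextIdx s s.length = s.length := by
  rw [pvNextIdx]; simp

theorem pvNextIdx_le (s : List Char) (j : Nat) (hj : j ≤ s.length) : pvNextIdx s j ≤ s.length := by
  rw [pvNextIdx]
  split
  · exact pvNextIdx_le s (j + 1) (by omega)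
  · exact hj
termination_by s.length - j
decreasing_by omega

theorem foldl_pair' {α : Type} (f : Int → α → Int) (g : Int → α → Int)
    (l : List α) (a b : Int) :
    l.foldl (fun p i => (f p.1 i, g p.2 i)) (a, b) = (l.foldl f a, l.foldl g b) := by
  induction l generalizing a b with
  | nil => rfl
  | cons x xs ih => simpa using ih (f a x) (g b x)

theorem foldl_min_init (s : List Char) (l : List Nat) (b x : Int) :
    l.foldl (fun a i => min a (pvM s i)) (min b x) = min (l.foldl (fun a i => min a (pvM s i)) b) x := by
  induction l generalizing b with
  | nil => rfl
  | cons y ys ih =>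
      have : min (min b x) (pvM s y) = min (min b (pvM s y)) x := by
        rw [min_assoc, min_comm x, ← min_assoc]
      simpa [this] using ih (min b (pvM s y))

-- char-indexed sum fold = range-indexed sum fold
theorem foldl_cost_range (s : List Char) (z : Int) :
    s.foldl (fun a c => a + min ((c.toNat : Int) - 65) (91 - (c.toNat : Int))) z =
      (List.range s.length).foldl (fun a i => a + pvCost s i) z := by
  induction s generalizing z with
  | nil => rfl
  | cons c cs ih =>
      simp only [List.foldl_cons, List.length_cons, List.range_succ_eq_map, List.foldl_cons,
        List.foldl_map]
      rw [ih]
      have : (fun (a : Int) (i : Nat) => a + pvCost cs i) =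
          (fun (a : Int) (i : Nat) => a + pvCost (c :: cs) (i + 1)) := by
        funext a i; simp [pvCost]
      rw [show z + min ((c.toNat : Int) - 65) (91 - (c.toNat : Int)) = z + pvCost (c :: cs) 0 from by simp [pvCost], this]

-- loop invariant for B's backward pass: d = n - nextIdx
theorem pvGoB_eq (s : List Char) (k : Nat) (hk : k ≤ s.length) (b : Int) :
    pvGoB s s.length k (b, (s.length : Int) - (pvNextIdx s k : Int)) =
      (List.range k).foldl (fun a i => min a (pvM s i)) b := by
  induction k generalizing b with
  | zero => simp [pvGoB]
  | succ k ih =>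
      have hklt : k < s.length := hk
      have hnxle : pvNextIdx s (k + 1) ≤ s.length := pvNextIdx_le s (k + 1) hk
      rw [pvGoB]
      have hv : (if ((k : Int) ≤ (s.length : Int) - (pvNextIdx s (k + 1) : Int)) then
            2 * (k : Int) + ((s.length : Int) - (pvNextIdx s (k + 1) : Int))
          else (k : Int) + 2 * ((s.length : Int) - (pvNextIdx s (k + 1) : Int))) = pvM s k := by
        unfold pvM
        split_ifs with h <;> [skip; skip] <;> omega
      have hbest : ∀ v : Int, (if v < b then v else b) = min b v := by
        intro v; split_ifs with h <;> omega
      have hd : (if s.getD k ' ' ≠ 'A' then (s.length : Int) - (k : Int)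
            else (s.length : Int) - (pvNextIdx s (k + 1) : Int)) =
          (s.length : Int) - (pvNextIdx s k : Int) := by
        rw [pvNextIdx_step s k hklt]
        split_ifs <;> simp
      simp only [hv, hbest, hd]
      rw [ih (Nat.le_of_succ_le hk)]
      rw [List.range_succ, List.foldl_append, List.foldl_cons, List.foldl_nil]
      exact foldl_min_init s (List.range k) b (pvM s k)

theorem solution_eq_canonical (name : String) :
    solution name =
      (List.range name.toList.length).foldl (fun a i => a + pvCost name.toList i) 0 +
        (List.range name.toList.length).foldl (fun a i => min a (pvM name.toList i)) ((name.toList.length : Int) - 1) := by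
  have hstep : (fun (st : Int × Int) i =>
      (st.1 + min (((name.toList.getD i ' ').toNat : Int) - 65) (90 - ((name.toList.getD i ' ').toNat : Int) + 1),
       min (min st.2 ((2 * (i : Int) + (name.toList.length : Int)) - (pvNextIdx name.toList (i + 1) : Int)))
           ((i : Int) + 2 * ((name.toList.length : Int) - (pvNextIdx name.toList (i + 1) : Int)))))
      = (fun (st : Int × Int) i => (st.1 + pvCost name.toList i, min st.2 (pvM name.toList i))) := by
    funext st i
    unfold pvCost pvM
    rw [min_assoc,
      show (90 - ((name.toList.getD i ' ').toNat : Int) + 1) = 91 - ((name.toList.getD i ' ').toNat : Int) from by ring]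
  simp only [solution]
  rw [hstep,
    foldl_pair' (fun a i => a + pvCost name.toList i) (fun b i => min b (pvM name.toList i))]

-- ===== VERDICT (by name: the statement is the Claim_ definition above) =====
theorem solution_spec : Claim_equal_solution := by
  intro name _
  unfold Spec_solution solution_alt
  have h := pvGoB_eq name.toList name.toList.length (le_refl _) ((name.toList.length : Int) - 1)
  rw [pvNextIdx_end] at h
  simp only [sub_self] at h
  simp only []
  rw [foldl_cost_range, h, solution_eq_canonical]
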